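-- pv_equiv track=rewrite | github.com/austinjung/python-microservices | microservices/app.py | get_highlight_from_concept
-- ===== SOURCE A (Python) =====
-- def append_highlighted(prev_highlighted, start_idx, end_idx, concept_line_text, highlighted_tokens):
--     if start_idx < end_idx:
--         if prev_highlighted:
--             highlighted_tokens.append(
--                 "<mark class='c0177'>{0}</mark>".format(concept_line_text[start_idx: end_idx])
--             )
--         else:
--             highlighted_tokens.append(
--                 "<span>{0}</span>".format(concept_line_text[start_idx: end_idx])
--             )
--     return not prev_highlighted, end_idx, end_idx
--
-- def get_highlight_from_concept(concept_line_text, concept):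
--     highlighted_tokens = []
--     start_idx = 0
--     end_idx = 0
--     index = 0
--     highlighted = False
--     for token in concept_line_text.split():
--         if token not in concept:
--             if highlighted:
--                 highlighted, start_idx, end_idx = append_highlighted(
--                     highlighted, start_idx, end_idx, concept_line_text, highlighted_tokens
--                 )
--         else:
--             if not highlighted:
--                 highlighted, start_idx, end_idx = append_highlighted(
--                     highlighted, start_idx, end_idx, concept_line_text, highlighted_tokens
--                 )
--         index += len(token) + 1
--         end_idx = index
--     append_highlighted(highlighted, start_idx, end_idx, concept_line_text, highlighted_tokens)
--     return ' '.join(highlighted_tokens)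
-- ===== SOURCE B (Python) =====
-- from itertools import groupby
--
-- def get_highlight_from_concept(concept_line_text, concept):
--     pieces = []
--     offset = 0
--     for key, group in groupby(concept_line_text.split(), key=lambda t: t in concept):
--         start = offset
--         for token in group:
--             offset += len(token) + 1
--         piece = concept_line_text[start:offset]
--         if key:
--             pieces.append("<mark class='c0177'>{0}</mark>".format(piece))
--         else:
--             pieces.append("<span>{0}</span>".format(piece))
--     return ' '.join(pieces)
-- ===== Notes on version B (the rewrite author's own statement) =====
-- stated objective: idiomatic
-- what changed: Replaced the toggling-flag state machine with deferred-emit helper by tokenize + itertools.groupby on concept-membership, then one formatting pass over the runs with a running character offset.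
import Mathlib
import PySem

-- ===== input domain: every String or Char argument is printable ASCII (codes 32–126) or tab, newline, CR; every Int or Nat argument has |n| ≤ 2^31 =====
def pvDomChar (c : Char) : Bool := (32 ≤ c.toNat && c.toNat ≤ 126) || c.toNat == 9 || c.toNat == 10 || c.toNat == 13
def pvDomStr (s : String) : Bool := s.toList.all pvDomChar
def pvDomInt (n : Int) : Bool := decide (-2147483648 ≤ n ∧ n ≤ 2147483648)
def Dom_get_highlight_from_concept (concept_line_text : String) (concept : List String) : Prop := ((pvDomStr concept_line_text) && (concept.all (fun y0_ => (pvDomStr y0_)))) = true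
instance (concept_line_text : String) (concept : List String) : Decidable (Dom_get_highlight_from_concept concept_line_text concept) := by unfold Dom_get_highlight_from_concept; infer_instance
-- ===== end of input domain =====

-- B replaces A's toggling-flag state machine by groupby-on-membership runs plus one formatting pass (idiomatic decomposition; same cost).

-- ===== PORT A =====
-- "<mark class='c0177'>{0}</mark>".format(piece) / "<span>{0}</span>".format(piece)
def pvFmt (prev_highlighted : Bool) (piece : List Char) : List Char :=
  if prev_highlighted then "<mark class='c0177'>".toList ++ piece ++ "</mark>".toList
  else "<span>".toList ++ piece ++ "</span>".toList

-- append_highlighted: returns (updated highlighted_tokens, (not prev, end, end))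
def append_highlighted (prev_highlighted : Bool) (start_idx end_idx : Int)
    (cs : List Char) (highlighted_tokens : List (List Char)) :
    List (List Char) × Bool × Int × Int :=
  (if start_idx < end_idx then
      highlighted_tokens ++ [pvFmt prev_highlighted (PySem.List.slice cs (some start_idx) (some end_idx))]
    else highlighted_tokens,
   !prev_highlighted, end_idx, end_idx)

-- the 'for token in concept_line_text.split()' loop; state (highlighted_tokens, start_idx, end_idx, index, highlighted)
def pvLoopA (cs : List Char) (conceptL : List (List Char)) :
    List (List Char) → List (List Char) × Int × Int × Int × Bool → List (List Char) × Int × Int × Int × Bool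
  | [], st => st
  | token :: ts, (toks, s, e, idx, hl) =>
    let r : List (List Char) × Bool × Int × Int :=
      if !(conceptL.contains token) then
        (if hl then append_highlighted hl s e cs toks else (toks, hl, s, e))
      else
        (if !hl then append_highlighted hl s e cs toks else (toks, hl, s, e))
    let idx' := idx + (token.length : Int) + 1
    pvLoopA cs conceptL ts (r.1, r.2.2.1, idx', idx', r.2.1)

def get_highlight_from_concept (concept_line_text : String) (concept : List String) : String :=
  let cs := concept_line_text.toList
  let st := pvLoopA cs (concept.map String.toList) (PySem.Chars.split₀ cs) ([], 0, 0, 0, false)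
  String.ofList (PySem.Chars.join [' '] (append_highlighted st.2.2.2.2 st.2.1 st.2.2.1 cs st.1).1)

-- ===== PORT B =====
-- itertools.groupby(tokens, key): consecutive runs of equal key
def pvGroupRuns (key : List Char → Bool) : List (List Char) → List (Bool × List (List Char))
  | [] => []
  | t :: ts =>
    (key t, t :: ts.takeWhile (fun u => key u == key t)) ::
      pvGroupRuns key (ts.dropWhile (fun u => key u == key t))
  termination_by ts => ts.length
  decreasing_by
    simpa using Nat.lt_succ_of_le (List.length_dropWhile_le _ _)

-- body of the 'for key, group in groupby(...)' loop; state (offset, pieces)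
def pvStepB (cs : List Char) (st : Int × List (List Char)) (g : Bool × List (List Char)) :
    Int × List (List Char) :=
  let start := st.1
  let off := g.2.foldl (fun o token => o + (token.length : Int) + 1) start
  let piece := PySem.List.slice cs (some start) (some off)
  (off, st.2 ++ [if g.1 then "<mark class='c0177'>".toList ++ piece ++ "</mark>".toList
                 else "<span>".toList ++ piece ++ "</span>".toList])

def get_highlight_from_concept_alt (concept_line_text : String) (concept : List String) : String :=
  let cs := concept_line_text.toList
  let conceptL := concept.map String.toList
  let groups := pvGroupRuns (fun t => conceptL.contains t) (PySem.Chars.split₀ cs)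
  String.ofList (PySem.Chars.join [' '] (groups.foldl (pvStepB cs) (0, [])).2)

-- ===== PRECONDITION & SPEC =====
def Spec_get_highlight_from_concept (concept_line_text : String) (concept : List String) (out : String) : Prop := out = get_highlight_from_concept_alt concept_line_text concept
instance (concept_line_text : String) (concept : List String) (out : String) : Decidable (Spec_get_highlight_from_concept concept_line_text concept out) := by unfold Spec_get_highlight_from_concept; infer_instance

-- ===== CLAIM (what is proved, stated in full; the proofs are below) =====
def Claim_equal_get_highlight_from_concept : Prop := ∀ (concept_line_text : String) (concept : List String), Dom_get_highlight_from_concept concept_line_text concept → Spec_get_highlight_from_concept concept_line_text concept (get_highlight_from_concept concept_line_text concept)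

-- ===== LEMMAS AND PROOFS =====

-- Python's len(token) + 1, summed over a group
def pvW (l : List (List Char)) : Int := l.foldl (fun a t => a + (t.length : Int) + 1) 0

-- A's final result after running the loop from a state with end_idx = index, then the final append
def pvFinA (cs : List Char) (conceptL : List (List Char)) (ts : List (List Char))
    (toks : List (List Char)) (s e : Int) (hl : Bool) : List (List Char) :=
  let st := pvLoopA cs conceptL ts (toks, s, e, e, hl)
  (append_highlighted st.2.2.2.2 st.2.1 st.2.2.1 cs st.1).1

-- B's pieces for a group list starting at offset o
def pvGEmit (cs : List Char) : List (Bool × List (List Char)) → Int → List (List Char)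
  | [], _ => []
  | (k, g) :: rest, o =>
    pvFmt k (PySem.List.slice cs (some o) (some (o + pvW g))) :: pvGEmit cs rest (o + pvW g)

theorem pvW_shift (g : List (List Char)) (a : Int) :
    g.foldl (fun o t => o + (t.length : Int) + 1) a = a + pvW g := by
  unfold pvW
  induction g generalizing a with
  | nil => simp
  | cons t ts ih =>
    simp only [List.foldl_cons]
    rw [ih (a + t.length + 1), ih ((0 : Int) + t.length + 1)]
    ring

theorem pvStepB_foldl (cs : List Char) (groups : List (Bool × List (List Char)))
    (o : Int) (acc : List (List Char)) :
    (groups.foldl (pvStepB cs) (o, acc)).2 = acc ++ pvGEmit cs groups o := by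
  induction groups generalizing o acc with
  | nil => simp [pvGEmit]
  | cons g rest ih =>
    obtain ⟨k, gl⟩ := g
    simp only [List.foldl_cons, pvStepB, pvGEmit]
    rw [pvW_shift gl o, ih]
    cases k <;> simp [pvFmt]

-- run lemma: from a mid-run state (s < e, current style k), A emits the current piece
-- extended through the run of tokens whose key is k, then continues on the remaining groups
theorem pvRun (cs : List Char) (conceptL : List (List Char)) (ts : List (List Char)) :
    ∀ (toks : List (List Char)) (s e : Int) (k : Bool), s < e →
    pvFinA cs conceptL ts toks s e k
      = toks ++ pvFmt k (PySem.List.slice cs (some s)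
            (some (e + pvW (ts.takeWhile (fun u => conceptL.contains u == k)))))
          :: pvGEmit cs
              (pvGroupRuns (fun t => conceptL.contains t)
                (ts.dropWhile (fun u => conceptL.contains u == k)))
              (e + pvW (ts.takeWhile (fun u => conceptL.contains u == k))) := by
  induction ts with
  | nil =>
    intro toks s e k hse
    simp [pvFinA, pvLoopA, append_highlighted, hse, pvGroupRuns, pvGEmit, pvW]
  | cons u ts ih =>
    intro toks s e k hse
    have hw : (0 : Int) ≤ (u.length : Int) := Int.natCast_nonneg _
    by_cases hk : conceptL.contains u = k
    · -- same key: no toggle, the run extends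
      have h1 : pvFinA cs conceptL (u :: ts) toks s e k
          = pvFinA cs conceptL ts toks s (e + u.length + 1) k := by
        unfold pvFinA
        simp only [pvLoopA]
        rw [hk]
        cases k <;> simp [append_highlighted]
      rw [h1, ih toks s (e + u.length + 1) k (by omega)]
      simp only [List.takeWhile_cons, List.dropWhile_cons, hk, BEq.rfl, if_true]
      have : pvW (u :: ts.takeWhile (fun v => conceptL.contains v == k))
          = (u.length : Int) + 1 + pvW (ts.takeWhile (fun v => conceptL.contains v == k)) := by
        unfold pvW
        rw [List.foldl_cons, pvW_shift _ ((0 : Int) + (u.length : Int) + 1), pvW_shift _ 0]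
        ring
      rw [this]
      have harr : e + ((u.length : Int) + 1 + pvW (ts.takeWhile (fun v => conceptL.contains v == k)))
          = e + (u.length : Int) + 1 + pvW (ts.takeWhile (fun v => conceptL.contains v == k)) := by ring
      rw [harr]
    · -- key flips: A appends the current piece and starts a new run
      have hk' : conceptL.contains u = !k := by
        revert hk; cases conceptL.contains u <;> cases k <;> simp
      have h1 : pvFinA cs conceptL (u :: ts) toks s e k
          = pvFinA cs conceptL ts
              (toks ++ [pvFmt k (PySem.List.slice cs (some s) (some e))])
              e (e + u.length + 1) (conceptL.contains u) := by
        unfold pvFinA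
        simp only [pvLoopA]
        rw [hk']
        cases k <;> simp [append_highlighted, hse]
      rw [h1, ih _ e (e + u.length + 1) (conceptL.contains u) (by omega)]
      have hkb : (conceptL.contains u == k) = false := by
        rw [hk']; cases k <;> rfl
      have htw : (u :: ts).takeWhile (fun v => conceptL.contains v == k) = [] := by
        simp only [List.takeWhile_cons, hkb, Bool.false_eq_true, if_false]
      have hdw : (u :: ts).dropWhile (fun v => conceptL.contains v == k) = u :: ts := by
        simp only [List.dropWhile_cons, hkb, Bool.false_eq_true, if_false]
      rw [htw, hdw]
      have hW0 : pvW ([] : List (List Char)) = 0 := rfl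
      rw [hW0]
      rw [pvGroupRuns]
      simp only [pvGEmit, add_zero]
      have : pvW (u :: ts.takeWhile (fun v => conceptL.contains v == conceptL.contains u))
          = (u.length : Int) + 1 + pvW (ts.takeWhile (fun v => conceptL.contains v == conceptL.contains u)) := by
        unfold pvW
        rw [List.foldl_cons, pvW_shift _ ((0 : Int) + (u.length : Int) + 1), pvW_shift _ 0]
        ring
      rw [this]
      have harr : e + ((u.length : Int) + 1 + pvW (ts.takeWhile (fun v => conceptL.contains v == conceptL.contains u)))
          = e + (u.length : Int) + 1 + pvW (ts.takeWhile (fun v => conceptL.contains v == conceptL.contains u)) := by ring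
      rw [harr]
      simp [List.append_assoc]

-- top-level: from the initial state (s = e) A's output is exactly B's group emission
theorem pvMain (cs : List Char) (conceptL : List (List Char)) (ts : List (List Char))
    (toks : List (List Char)) (s : Int) (hl : Bool) :
    pvFinA cs conceptL ts toks s s hl
      = toks ++ pvGEmit cs (pvGroupRuns (fun t => conceptL.contains t) ts) s := by
  cases ts with
  | nil => simp [pvFinA, pvLoopA, append_highlighted, pvGroupRuns, pvGEmit]
  | cons u ts =>
    have hw : (0 : Int) ≤ (u.length : Int) := Int.natCast_nonneg _
    have h1 : pvFinA cs conceptL (u :: ts) toks s s hl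
        = pvFinA cs conceptL ts toks s (s + u.length + 1) (conceptL.contains u) := by
      unfold pvFinA
      simp only [pvLoopA]
      cases hc : conceptL.contains u <;> cases hl <;> simp [append_highlighted]
    rw [h1, pvRun cs conceptL ts toks s (s + u.length + 1) (conceptL.contains u) (by omega)]
    rw [pvGroupRuns]
    simp only [pvGEmit]
    have : pvW (u :: ts.takeWhile (fun v => conceptL.contains v == conceptL.contains u))
        = (u.length : Int) + 1 + pvW (ts.takeWhile (fun v => conceptL.contains v == conceptL.contains u)) := by
      unfold pvW
      rw [List.foldl_cons, pvW_shift _ ((0 : Int) + (u.length : Int) + 1), pvW_shift _ 0]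
      ring
    rw [this]
    have harr : s + ((u.length : Int) + 1 + pvW (ts.takeWhile (fun v => conceptL.contains v == conceptL.contains u)))
        = s + (u.length : Int) + 1 + pvW (ts.takeWhile (fun v => conceptL.contains v == conceptL.contains u)) := by ring
    rw [harr]

-- ===== VERDICT (by name: the statement is the Claim_ definition above) =====
theorem get_highlight_from_concept_spec : Claim_equal_get_highlight_from_concept := by
  intro t concept _
  unfold Spec_get_highlight_from_concept get_highlight_from_concept get_highlight_from_concept_alt
  dsimp only
  rw [pvStepB_foldl]
  have := pvMain t.toList (concept.map String.toList) (PySem.Chars.split₀ t.toList) [] 0 false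
  unfold pvFinA at this
  simp only [List.nil_append] at this ⊢
  rw [← this]
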